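-- pv_equiv track=rewrite | github.com/LAF-US/IDAHO-VAULT | .github/scripts/daily_rollover.py | _find_todo_section_bounds
-- ===== SOURCE A (Python) =====
-- TODO_MARKER = "[[TO DO LIST]]"
--
-- def is_todo_marker(line: str) -> bool:
--     return line.strip() == TODO_MARKER
--
-- def _find_todo_section_bounds(lines: list[str]) -> tuple[int | None, int | None]:
--     """Return the marker line index and the exclusive end index for the TODO section."""
--
--     marker_index = None
--     for index, line in enumerate(lines):
--         if is_todo_marker(line):
--             marker_index = index
--             break
--
--     if marker_index is None:
--         return None, None
--
--     end_index = len(lines)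
--     for index in range(marker_index + 1, len(lines)):
--         line = lines[index]
--         if line.strip() == "---" or line.startswith("## ") or line.startswith("Notes:"):
--             end_index = index
--             break
--
--     return marker_index, end_index
-- ===== SOURCE B (Python) =====
-- TODO_MARKER = "[[TO DO LIST]]"
--
--
-- def _find_todo_section_bounds(lines):
--     """Single REVERSE pass: walk the lines back-to-front, maintaining the
--     nearest section-terminator index seen so far (next_end); every marker
--     line overwrites the result with (its index, next_end), so the earliest
--     marker wins and its end is the first terminator strictly after it."""
--     result = (None, None)
--     next_end = len(lines)
--     for i in range(len(lines) - 1, -1, -1):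
--         line = lines[i]
--         if line.strip() == TODO_MARKER:
--             result = (i, next_end)
--         if line.strip() == "---" or line.startswith("## ") or line.startswith("Notes:"):
--             next_end = i
--     return result
-- ===== Notes on version B (the rewrite author's own statement) =====
-- stated objective: alternative
-- what changed: Replaced A's two forward scans (find the marker, then scan onward for the terminator) by a single reverse traversal that builds the answer back-to-front, carrying the nearest terminator index seen so far and overwriting the result at each marker line so the earliest marker wins.
import Mathlib
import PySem

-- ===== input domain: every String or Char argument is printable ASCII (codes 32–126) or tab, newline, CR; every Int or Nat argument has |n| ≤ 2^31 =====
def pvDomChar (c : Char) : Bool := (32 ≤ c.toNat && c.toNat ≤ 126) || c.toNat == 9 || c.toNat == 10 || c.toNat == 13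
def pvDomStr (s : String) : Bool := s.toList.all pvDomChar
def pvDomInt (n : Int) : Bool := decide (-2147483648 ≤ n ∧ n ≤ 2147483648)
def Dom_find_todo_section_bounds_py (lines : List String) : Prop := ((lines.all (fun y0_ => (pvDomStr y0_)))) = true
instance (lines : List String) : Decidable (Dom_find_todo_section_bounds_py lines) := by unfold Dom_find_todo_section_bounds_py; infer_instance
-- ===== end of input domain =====

-- B replaces A's two forward scans by a single REVERSE traversal carrying the
-- nearest terminator index; objective: alternative decomposition, same cost.

-- ===== PORT A =====
def is_todo_marker_py (line : String) : Bool := PySem.Str.strip line == "[[TO DO LIST]]"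

-- A's first loop: for index, line in enumerate(lines): if is_todo_marker(line): break
def findMarkerA : List String → Int → Option Int
  | [], _ => none
  | l :: rest, i => if is_todo_marker_py l then some i else findMarkerA rest (i + 1)

def isEndLineA (line : String) : Bool :=
  PySem.Str.strip line == "---" || PySem.Str.startswith line "## " || PySem.Str.startswith line "Notes:"

-- A's second loop over range(marker+1, len(lines)); the none branch of pyGet? is unreachable (indices in range)
def endScanA (lines : List String) : List Int → Int → Int
  | [], e => e
  | i :: rest, e =>
    match PySem.List.pyGet? lines i with
    | some line => if isEndLineA line then i else endScanA lines rest e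
    | none => endScanA lines rest e

def find_todo_section_bounds_py (lines : List String) : Option Int × Option Int :=
  match findMarkerA lines 0 with
  | none => (none, none)
  | some m =>
    (some m, some (endScanA lines (PySem.List.pyRange (m + 1) (lines.length : Int) 1) (lines.length : Int)))

-- ===== PORT B =====
-- B's reverse loop, as structural recursion where the head (index i) is processed
-- AFTER the recursive call on the suffix — i.e. in descending index order, exactly
-- B's `for i in range(len(lines)-1, -1, -1)` carrying the state (result, next_end).
def scanB : List String → Int → (Option Int × Option Int) × Int
  | [], i => ((none, none), i)          -- base: next_end = len(lines); i here is len(lines)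
  | l :: rest, i =>
    let s := scanB rest (i + 1)
    let res := if PySem.Str.strip l == "[[TO DO LIST]]" then (some i, some s.2) else s.1
    let ne := if PySem.Str.strip l == "---" || PySem.Str.startswith l "## " || PySem.Str.startswith l "Notes:" then i else s.2
    (res, ne)

def find_todo_section_bounds_py_alt (lines : List String) : Option Int × Option Int :=
  (scanB lines 0).1

-- ===== PRECONDITION & SPEC =====
def Spec_find_todo_section_bounds_py (lines : List String) (out : Option Int × Option Int) : Prop := out = find_todo_section_bounds_py_alt lines
instance (lines : List String) (out : Option Int × Option Int) : Decidable (Spec_find_todo_section_bounds_py lines out) := by unfold Spec_find_todo_section_bounds_py; infer_instance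

-- ===== CLAIM (what is proved, stated in full; the proofs are below) =====
def Claim_equal_find_todo_section_bounds_py : Prop := ∀ (lines : List String), Dom_find_todo_section_bounds_py lines → Spec_find_todo_section_bounds_py lines (find_todo_section_bounds_py lines)

-- ===== LEMMAS AND PROOFS =====

-- Proof-side closed forms: first terminator index ≥ i in the suffix (default: past the end),
-- and the (marker, end) answer for the suffix starting at index i.
def firstEnd : List String → Int → Int
  | [], i => i
  | l :: rest, i => if isEndLineA l then i else firstEnd rest (i + 1)

def firstRes : List String → Int → Option Int × Option Int
  | [], _ => (none, none)
  | l :: rest, i =>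
    if is_todo_marker_py l then (some i, some (firstEnd rest (i + 1))) else firstRes rest (i + 1)

-- B computes exactly (firstRes, firstEnd) of the suffix.
theorem scanB_eq (rest : List String) : ∀ (i : Int),
    scanB rest i = (firstRes rest i, firstEnd rest i) := by
  induction rest with
  | nil => intro i; simp [scanB, firstRes, firstEnd]
  | cons l rest ih =>
    intro i
    simp only [scanB, ih]
    rfl

-- A's end-scan over the index range equals the closed-form firstEnd of the suffix.
theorem endScanA_eq (rest : List String) : ∀ (pre : List String),
    endScanA (pre ++ rest)
      (PySem.List.pyRange (pre.length : Int) (((pre ++ rest).length : Nat) : Int) 1)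
      (((pre ++ rest).length : Nat) : Int)
    = firstEnd rest (pre.length : Int) := by
  induction rest with
  | nil =>
    intro pre
    simp [PySem.List.pyRange_one_eq_nil le_rfl, endScanA, firstEnd]
  | cons l rest ih =>
    intro pre
    have hlen : ((pre.length : Int)) < (((pre ++ l :: rest).length : Nat) : Int) := by simp
    rw [PySem.List.pyRange_one_cons hlen]
    rw [show endScanA (pre ++ l :: rest)
          ((pre.length : Int) :: PySem.List.pyRange ((pre.length : Int) + 1) (((pre ++ l :: rest).length : Nat) : Int) 1)
          (((pre ++ l :: rest).length : Nat) : Int)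
        = (if isEndLineA l then (pre.length : Int)
           else endScanA (pre ++ l :: rest)
             (PySem.List.pyRange ((pre.length : Int) + 1) (((pre ++ l :: rest).length : Nat) : Int) 1)
             (((pre ++ l :: rest).length : Nat) : Int)) from by
      simp [endScanA]]
    by_cases h : isEndLineA l = true
    · simp [firstEnd, h]
    · rw [if_neg h]
      have := ih (pre ++ [l])
      simp only [List.append_assoc, List.singleton_append, List.length_append,
        List.length_singleton] at this ⊢
      rw [firstEnd, if_neg h]
      simpa [Int.add_comm] using this

-- A's marker scan composed with its end scan equals the closed-form firstRes.
theorem mainA_eq (rest : List String) : ∀ (pre : List String),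
    (match findMarkerA rest (pre.length : Int) with
     | none => ((none, none) : Option Int × Option Int)
     | some m =>
       (some m, some (endScanA (pre ++ rest)
         (PySem.List.pyRange (m + 1) (((pre ++ rest).length : Nat) : Int) 1)
         (((pre ++ rest).length : Nat) : Int))))
    = firstRes rest (pre.length : Int) := by
  induction rest with
  | nil => intro pre; simp [findMarkerA, firstRes]
  | cons l rest ih =>
    intro pre
    by_cases h : is_todo_marker_py l = true
    · simp only [findMarkerA, h, if_true, firstRes]
      have hl : pre ++ l :: rest = (pre ++ [l]) ++ rest := by simp
      have hcast : ((pre.length : Int) + 1) = (((pre ++ [l]).length : Nat) : Int) := by simp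
      rw [hl, hcast, endScanA_eq rest (pre ++ [l])]
    · have hne : is_todo_marker_py l = false := by simpa using h
      simp only [findMarkerA, firstRes, hne, Bool.false_eq_true, if_false]
      have hl : pre ++ l :: rest = (pre ++ [l]) ++ rest := by simp
      have hcast : ((pre.length : Int) + 1) = (((pre ++ [l]).length : Nat) : Int) := by simp
      rw [hl, hcast]
      exact ih (pre ++ [l])

-- ===== VERDICT (by name: the statement is the Claim_ definition above) =====
theorem find_todo_section_bounds_py_spec : Claim_equal_find_todo_section_bounds_py := by
  intro lines _
  unfold Spec_find_todo_section_bounds_py find_todo_section_bounds_py find_todo_section_bounds_py_alt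
  rw [scanB_eq]
  have := mainA_eq lines ([] : List String)
  simpa using this
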